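-- pv_equiv track=rewrite | github.com/LoveBranch/youtube-auto | scripts/thumbnail.py | _extract_title_from_script
-- ===== SOURCE A (Python) =====
-- def _extract_title_from_script(script_text: str) -> str:
--     """대본에서 제목(# 헤딩)을 추출한다."""
--     for line in script_text.splitlines():
--         line = line.strip()
--         if line.startswith("# "):
--             return line[2:].strip()
--     for line in script_text.splitlines():
--         line = line.strip()
--         if line and not line.startswith("#"):
--             return line[:40]
--     return "YouTube Video"
-- ===== SOURCE B (Python) =====
-- def _extract_title_from_script(script_text: str) -> str:
--     """Single pass: return '# ' heading immediately, remember first fallback line."""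
--     fallback = None
--     for raw in script_text.splitlines():
--         line = raw.strip()
--         if line.startswith("# "):
--             return line[2:].strip()
--         if fallback is None and line and not line.startswith("#"):
--             fallback = line[:40]
--     return fallback if fallback is not None else "YouTube Video"
-- ===== Notes on version B (the rewrite author's own statement) =====
-- stated objective: simpler
-- what changed: Replaced A's two traversals of splitlines (first hunting a heading line, then re-scanning for a fallback line) by a single pass that returns a heading immediately and records the first non-empty non-heading line as a fallback used after the loop.
import Mathlib
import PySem

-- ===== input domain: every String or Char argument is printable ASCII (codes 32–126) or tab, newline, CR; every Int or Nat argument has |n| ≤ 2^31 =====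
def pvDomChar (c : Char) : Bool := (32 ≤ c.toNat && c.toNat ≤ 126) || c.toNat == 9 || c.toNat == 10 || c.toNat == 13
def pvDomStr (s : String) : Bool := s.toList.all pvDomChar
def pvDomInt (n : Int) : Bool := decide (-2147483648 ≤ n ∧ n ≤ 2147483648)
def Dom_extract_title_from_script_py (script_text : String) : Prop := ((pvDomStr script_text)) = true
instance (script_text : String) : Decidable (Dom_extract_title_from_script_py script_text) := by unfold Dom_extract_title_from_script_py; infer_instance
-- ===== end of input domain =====

-- B replaces A's two passes over the lines with a single pass carrying a fallback accumulator (objective: simpler).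

-- ===== PORT A =====
-- first loop of A: find a '# ' heading
def pvFindHeading : List String → Option String
  | [] => none
  | l :: rest =>
    let line := PySem.Str.strip l
    if PySem.Str.startswith line "# " then
      some (PySem.Str.strip (PySem.Str.slice line (some 2) none))
    else pvFindHeading rest

-- second loop of A: first non-empty line not starting with '#', truncated to 40 chars
def pvFindFallback : List String → Option String
  | [] => none
  | l :: rest =>
    let line := PySem.Str.strip l
    if PySem.Str.len line != 0 && !(PySem.Str.startswith line "#") then
      some (PySem.Str.slice line none (some 40))
    else pvFindFallback rest

def extract_title_from_script_py (script_text : String) : String :=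
  match pvFindHeading (PySem.Str.splitlines script_text) with
  | some t => t
  | none =>
    match pvFindFallback (PySem.Str.splitlines script_text) with
    | some t => t
    | none => "YouTube Video"

-- ===== PORT B =====
-- single pass: return a heading immediately, remember the first fallback line
def pvScan : List String → Option String → String
  | [], fb => fb.getD "YouTube Video"
  | l :: rest, fb =>
    let line := PySem.Str.strip l
    if PySem.Str.startswith line "# " then
      PySem.Str.strip (PySem.Str.slice line (some 2) none)
    else if fb.isNone && (PySem.Str.len line != 0) && !(PySem.Str.startswith line "#") then
      pvScan rest (some (PySem.Str.slice line none (some 40)))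
    else pvScan rest fb

def extract_title_from_script_py_alt (script_text : String) : String :=
  pvScan (PySem.Str.splitlines script_text) none

-- ===== PRECONDITION & SPEC =====
def Spec_extract_title_from_script_py (script_text : String) (out : String) : Prop := out = extract_title_from_script_py_alt script_text
instance (script_text : String) (out : String) : Decidable (Spec_extract_title_from_script_py script_text out) := by unfold Spec_extract_title_from_script_py; infer_instance

-- ===== CLAIM (what is proved, stated in full; the proofs are below) =====
def Claim_equal_extract_title_from_script_py : Prop := ∀ (script_text : String), Dom_extract_title_from_script_py script_text → Spec_extract_title_from_script_py script_text (extract_title_from_script_py script_text)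

-- ===== LEMMAS AND PROOFS =====
theorem pvScan_eq (ls : List String) (fb : Option String) :
    pvScan ls fb =
      match pvFindHeading ls with
      | some t => t
      | none => ((fb.orElse fun _ => pvFindFallback ls).getD "YouTube Video") := by
  induction ls generalizing fb with
  | nil => cases fb <;> simp [pvScan, pvFindHeading, pvFindFallback]
  | cons l rest ih =>
    by_cases h1 : PySem.Chars.startswith (PySem.Chars.strip l.toList) ['#', ' '] = true
    · simp [pvScan, pvFindHeading, h1]
    · by_cases h2 : (¬PySem.Chars.strip l.toList = []) ∧
          PySem.Chars.startswith (PySem.Chars.strip l.toList) ['#'] = false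
      · obtain ⟨h2a, h2b⟩ := h2
        cases fb with
        | none =>
          cases hh : pvFindHeading rest <;>
            simp [pvScan, pvFindHeading, pvFindFallback, h1, h2a, h2b, ih, hh]
        | some x =>
          cases hh : pvFindHeading rest <;>
            simp [pvScan, pvFindHeading, pvFindFallback, h1, h2a, h2b, ih, hh]
      · cases fb with
        | none =>
          cases hh : pvFindHeading rest <;>
            simp [pvScan, pvFindHeading, pvFindFallback, h1, h2, ih, hh]
        | some x =>
          cases hh : pvFindHeading rest <;>
            simp [pvScan, pvFindHeading, pvFindFallback, h1, h2, ih, hh]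

-- ===== VERDICT (by name: the statement is the Claim_ definition above) =====
theorem extract_title_from_script_py_spec : Claim_equal_extract_title_from_script_py := by
  intro s _
  unfold Spec_extract_title_from_script_py extract_title_from_script_py extract_title_from_script_py_alt
  rw [pvScan_eq]
  cases h : pvFindHeading (PySem.Str.splitlines s) <;> cases h2 : pvFindFallback (PySem.Str.splitlines s) <;> simp
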